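-- pv_equiv track=rewrite | github.com/IXLM-uni/Competnecy | rank_competencies.py | split_passports_into_batches
-- ===== SOURCE A (Python) =====
-- def split_passports_into_batches(passports_md: str, batch_size: int) -> list[str]:
--     """Разбивает каталог паспортов на батчи по N штук, сохраняя заголовки категорий."""
--     lines = passports_md.split("\n")
--     batches = []
--     current: list[str] = []
--     current_category: str | None = None
--     passport_count = 0
--
--     for line in lines:
--         if line.startswith("## ") and not line.startswith("### "):
--             current_category = line
--             current.append(line)
--             continue
--         if line.startswith("### "):
--             if passport_count >= batch_size and current:
--                 batches.append("\n".join(current))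
--                 current = []
--                 if current_category:
--                     current.append(current_category)
--                 passport_count = 0
--             passport_count += 1
--         current.append(line)
--
--     if current:
--         batches.append("\n".join(current))
--     return batches
-- ===== SOURCE B (Python) =====
-- def split_passports_into_batches(passports_md: str, batch_size: int) -> list[str]:
--     """Разбивает каталог паспортов на батчи по N штук, сохраняя заголовки категорий."""
--     # Pass 1: group the lines into a preamble plus passport blocks; each block
--     # records the category header ('## ' line) active when its '### ' line appears.
--     preamble: list[str] = []
--     blocks: list[tuple[str | None, list[str]]] = []
--     category: str | None = None
--     for line in passports_md.split("\n"):
--         if line.startswith("### "):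
--             blocks.append((category, [line]))
--         else:
--             if line.startswith("## "):
--                 category = line
--             (blocks[-1][1] if blocks else preamble).append(line)
--     if not blocks:
--         return ["\n".join(preamble)] if preamble else []
--     # Pass 2: chunk the blocks into runs of batch_size; the first batch carries the
--     # preamble, every later batch re-opens with its first block's category header.
--     batches: list[str] = []
--     for i in range(0, len(blocks), batch_size):
--         run = blocks[i:i + batch_size]
--         if i == 0:
--             lines = preamble + [l for _, ls in run for l in ls]
--         else:
--             cat = run[0][0]
--             lines = ([cat] if cat is not None else []) + [l for _, ls in run for l in ls]
--         batches.append("\n".join(lines))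
--     return batches
-- ===== Notes on version B (the rewrite author's own statement) =====
-- stated objective: alternative
-- what changed: A's single pass flushes batches on the fly with a running passport counter; B first groups the lines into a preamble plus passport blocks (each recording its active '## ' category header), then slices the block list into runs of batch_size and joins each run into a batch. Pre_ excludes batch_size <= 0, the function's unnatural domain, where A's count>=batch_size test accidentally flushes before every passport and B's range-stepped chunking raises or yields nothing.
-- outside the precondition, e.g. on split_passports_into_batches('a\n### p\n### q', 0): A returns ['a', '### p', '### q'], B raises ValueError; on split_passports_into_batches('### p\n### q', -1): A returns ['### p', '### q'], B returns []
import Mathlib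
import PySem

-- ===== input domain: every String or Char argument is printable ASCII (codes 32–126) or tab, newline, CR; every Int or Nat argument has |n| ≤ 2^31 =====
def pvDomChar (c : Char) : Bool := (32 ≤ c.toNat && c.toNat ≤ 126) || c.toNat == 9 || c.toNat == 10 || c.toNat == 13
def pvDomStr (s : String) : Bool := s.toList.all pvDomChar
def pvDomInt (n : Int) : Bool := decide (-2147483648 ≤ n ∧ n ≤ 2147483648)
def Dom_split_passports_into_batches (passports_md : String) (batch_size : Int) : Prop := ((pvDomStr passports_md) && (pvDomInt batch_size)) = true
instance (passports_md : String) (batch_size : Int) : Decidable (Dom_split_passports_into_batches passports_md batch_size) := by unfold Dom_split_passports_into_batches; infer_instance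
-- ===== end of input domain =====

-- B re-implements A by a different decomposition: a first pass groups the lines into a preamble
-- plus passport blocks (each recording its active '## ' category header), and a second pass slices
-- the block list into runs of batch_size and joins each run into a batch; same cost, no speed claim.
-- Pre_ restricts to the natural domain batch_size ≥ 1 (see the comment at Pre_).

-- ===== PORT A =====
-- one loop iteration of A: state = (batches, current, current_category, passport_count)
def stepA (bs : Int) (st : List String × List String × Option String × Int) (line : String) :
    List String × List String × Option String × Int :=
  match st with
  | (batches, current, cat, count) =>
    if PySem.Str.startswith line "## " ∧ ¬ PySem.Str.startswith line "### " then
      (batches, current ++ [line], some line, count)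
    else if PySem.Str.startswith line "### " then
      -- flush when passport_count >= batch_size and current is nonempty,
      -- then append the line and bump the count
      if count ≥ bs ∧ current ≠ [] then
        (batches ++ [PySem.Str.join "\n" current],
         (match cat with | some c => [c] | none => []) ++ [line], cat, (0 : Int) + 1)
      else (batches, current ++ [line], cat, count + 1)
    else (batches, current ++ [line], cat, count)

def split_passports_into_batches (passports_md : String) (batch_size : Int) : List String :=
  let lines := List.map String.ofList (PySem.Chars.splitOn passports_md.toList ['\n'])
  let st := lines.foldl (stepA batch_size) ([], [], none, 0)
  st.1 ++ (if st.2.1 ≠ [] then [PySem.Str.join "\n" st.2.1] else [])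

-- ===== PORT B =====
-- replace the last element of a list (Python's `blocks[-1][1].append(line)`)
def pvUpdLast {α : Type} (f : α → α) : List α → List α
  | [] => []
  | [a] => [f a]
  | a :: b :: rest => a :: pvUpdLast f (b :: rest)

-- first pass: state = (preamble, blocks, category); a block is (category header, its lines)
def stepB (st : List String × List (Option String × List String) × Option String) (line : String) :
    List String × List (Option String × List String) × Option String :=
  match st with
  | (pre, blocks, cat) =>
    if PySem.Str.startswith line "### " then
      (pre, blocks ++ [(cat, [line])], cat)
    else
      let cat' := if PySem.Str.startswith line "## " then some line else cat
      match blocks with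
      | [] => (pre ++ [line], [], cat')
      | _ :: _ => (pre, pvUpdLast (fun b => (b.1, b.2 ++ [line])) blocks, cat')

-- `cat = run[0][0]; ([cat] if cat is not None else [])`
def pvHdr (run : List (Option String × List String)) : List String :=
  match run with
  | (some c, _) :: _ => [c]
  | _ => []

-- `[l for _, ls in run for l in ls]`
def pvFlat (run : List (Option String × List String)) : List String :=
  run.flatMap (fun b => b.2)

def split_passports_into_batches_alt (passports_md : String) (batch_size : Int) : List String :=
  let lines := List.map String.ofList (PySem.Chars.splitOn passports_md.toList ['\n'])
  let st := lines.foldl stepB ([], [], none)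
  let pre := st.1
  let blocks := st.2.1
  if blocks = [] then (if pre ≠ [] then [PySem.Str.join "\n" pre] else [])
  else
    (PySem.List.pyRange 0 blocks.length batch_size).foldl
      (fun acc i =>
        let run := PySem.List.slice blocks (some i) (some (i + batch_size))
        let ls := if i = 0 then pre ++ pvFlat run else pvHdr run ++ pvFlat run
        acc ++ [PySem.Str.join "\n" ls]) []

-- ===== PRECONDITION & SPEC =====
-- Pre_ restricts to the function's natural domain batch_size ≥ 1: for batch_size ≤ 0 A's
-- `count >= batch_size` test makes it flush before every passport (even cutting the preamble
-- into a batch of its own), an artefact outside the function's purpose, and B's range-stepped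
-- chunking raises (step 0) or yields no runs there.
def Pre_split_passports_into_batches (passports_md : String) (batch_size : Int) : Prop :=
  1 ≤ batch_size
instance (passports_md : String) (batch_size : Int) : Decidable (Pre_split_passports_into_batches passports_md batch_size) := by unfold Pre_split_passports_into_batches; infer_instance

def pvWitness_split_passports_into_batches : String × Int := ("## A\n### p\nx\n### q", 1)

def Spec_split_passports_into_batches (passports_md : String) (batch_size : Int) (out : List String) : Prop := out = split_passports_into_batches_alt passports_md batch_size
instance (passports_md : String) (batch_size : Int) (out : List String) : Decidable (Spec_split_passports_into_batches passports_md batch_size out) := by unfold Spec_split_passports_into_batches; infer_instance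

-- ===== CLAIM (what is proved, stated in full; the proofs are below) =====
def Claim_equal_split_passports_into_batches : Prop := ∀ (passports_md : String) (batch_size : Int), Dom_split_passports_into_batches passports_md batch_size → Pre_split_passports_into_batches passports_md batch_size → Spec_split_passports_into_batches passports_md batch_size (split_passports_into_batches passports_md batch_size)

-- ===== LEMMAS AND PROOFS =====

theorem pvUpdLast_concat {α : Type} (f : α → α) (xs : List α) (a : α) :
    pvUpdLast f (xs ++ [a]) = xs ++ [f a] := by
  induction xs with
  | nil => rfl
  | cons x xs ih => cases xs <;> simp_all [pvUpdLast]

theorem pvUpdLast_cons {α : Type} (f : α → α) (a : α) (l : List α) (h : l ≠ []) :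
    pvUpdLast f (a :: l) = a :: pvUpdLast f l := by
  cases l with
  | nil => exact absurd rfl h
  | cons b t => rfl

-- chunk a list into runs of k (k ≥ 1): the shape of B's slices
def pvChunks {α : Type} (k : Nat) : List α → List (List α)
  | [] => []
  | x :: xs => (x :: xs.take (k - 1)) :: pvChunks k (xs.drop (k - 1))
termination_by l => l.length
decreasing_by simp

-- the batches, given the runs (first run carries the preamble, later runs their header)
def pvBatches (pre : List String) (runs : List (List (Option String × List String))) : List String :=
  match runs with
  | [] => []
  | r :: rest =>
      PySem.Str.join "\n" (pre ++ pvFlat r) ::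
        rest.map (fun r => PySem.Str.join "\n" (pvHdr r ++ pvFlat r))

-- A's loop state as a function of B's parse state
def pvF (bs : Int) (st : List String × List (Option String × List String) × Option String) :
    List String × List String × Option String × Int :=
  match st with
  | (pre, blocks, cat) =>
    match blocks with
    | [] => ([], pre, cat, 0)
    | _ :: _ =>
      let runs := pvChunks bs.toNat blocks
      let last := runs.getLastD []
      (pvBatches pre runs.dropLast,
       (if runs.dropLast = [] then pre else pvHdr last) ++ pvFlat last,
       cat, (last.length : Int))

def pvValid (st : List String × List (Option String × List String) × Option String) : Prop :=
  ∀ b ∈ st.2.1, b.2 ≠ ([] : List String)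

theorem pv_sw3_not2 (line : String) (h : PySem.Str.startswith line "### " = true) :
    PySem.Str.startswith line "## " = false := by
  simp only [PySem.Str.startswith, PySem.Chars.startswith, List.isPrefixOf_iff_prefix,
    Bool.eq_false_iff, ne_eq] at h ⊢
  intro h2
  obtain ⟨t, ht⟩ := h
  obtain ⟨u, hu⟩ := h2
  have e3 : "### ".toList = ['#','#','#',' '] := by decide
  have e2 : "## ".toList = ['#','#',' '] := by decide
  rw [e3] at ht; rw [e2, ← ht] at hu
  simp at hu

theorem pvChunks_ne_nil {α : Type} (k : Nat) (xs : List α) (h : xs ≠ []) :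
    pvChunks k xs ≠ [] := by
  cases xs with
  | nil => exact absurd rfl h
  | cons x t => simp [pvChunks]

theorem pvChunks_snoc {α : Type} (k : Nat) (hk : 1 ≤ k) (xs : List α) (b : α) :
    pvChunks k (xs ++ [b]) =
      if xs.length % k = 0 then pvChunks k xs ++ [[b]]
      else pvUpdLast (fun r => r ++ [b]) (pvChunks k xs) := by
  induction xs using pvChunks.induct k with
  | case1 => simp [pvChunks]
  | case2 x rest ih =>
    by_cases hlen : rest.length < k - 1
    · have h1 : (rest ++ [b]).take (k-1) = rest ++ [b] := by
        apply List.take_of_length_le; simp; omega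
      have h2 : (rest ++ [b]).drop (k-1) = [] := by
        apply List.drop_eq_nil_of_le; simp; omega
      have h3 : rest.take (k-1) = rest := by apply List.take_of_length_le; omega
      have h4 : rest.drop (k-1) = [] := by apply List.drop_eq_nil_of_le; omega
      have h5 : (x :: rest).length % k ≠ 0 := by
        rw [Nat.mod_eq_of_lt (by simp; omega)]; simp
      simp only [List.cons_append, pvChunks, h1, h2, h3, h4, h5, if_neg]
      simp [pvChunks, pvUpdLast]
    · push_neg at hlen
      have h1 : (rest ++ [b]).take (k-1) = rest.take (k-1) :=
        List.take_append_of_le_length hlen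
      have h2 : (rest ++ [b]).drop (k-1) = rest.drop (k-1) ++ [b] :=
        List.drop_append_of_le_length hlen
      have hmod : (rest.drop (k-1)).length % k = (x :: rest).length % k := by
        simp only [List.length_drop, List.length_cons]
        have : rest.length + 1 = (rest.length - (k-1)) + k := by omega
        rw [this, Nat.add_mod_right]
      simp only [List.length_drop, List.length_cons] at hmod
      simp only [List.cons_append, pvChunks, h1, h2, ih, List.length_drop, List.length_cons]
      by_cases hc : (rest.length + 1) % k = 0
      · have hc' : (rest.length - (k-1)) % k = 0 := hmod.trans hc
        simp [hc, hc']
      · have hc' : ¬ (rest.length - (k-1)) % k = 0 := by rw [hmod]; exact hc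
        have hdrop : rest.drop (k-1) ≠ [] := by
          intro he
          have h0 : rest.length - (k-1) = 0 := by
            have := congrArg List.length he
            simp at this
            omega
          rw [h0] at hc'
          simp at hc'
        rw [if_neg hc, if_neg hc']
        rw [pvUpdLast_cons _ _ _ (pvChunks_ne_nil _ _ hdrop)]

theorem pvUpdLast_length {α : Type} (f : α → α) (l : List α) :
    (pvUpdLast f l).length = l.length := by
  induction l with
  | nil => rfl
  | cons a t ih => cases t <;> simp_all [pvUpdLast]

theorem pvChunks_run_ne_nil {α : Type} (k : Nat) (xs : List α) :
    ∀ r ∈ pvChunks k xs, r ≠ [] := by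
  induction xs using pvChunks.induct k with
  | case1 => simp [pvChunks]
  | case2 x rest ih =>
    intro r hr
    simp only [pvChunks, List.mem_cons] at hr
    rcases hr with h | h
    · simp [h]
    · exact ih r h

theorem pvChunks_mem {α : Type} (k : Nat) (xs : List α) :
    ∀ r ∈ pvChunks k xs, ∀ b ∈ r, b ∈ xs := by
  induction xs using pvChunks.induct k with
  | case1 => simp [pvChunks]
  | case2 x rest ih =>
    intro r hr b hb
    simp only [pvChunks, List.mem_cons] at hr
    rcases hr with h | h
    · subst h
      rcases List.mem_cons.mp hb with h | h
      · simp [h]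
      · exact List.mem_cons_of_mem _ (List.mem_of_mem_take h)
    · exact List.mem_cons_of_mem _ (List.mem_of_mem_drop (ih r h b hb))

theorem pvChunks_getLastD_length {α : Type} (k : Nat) (hk : 1 ≤ k) (xs : List α) (h : xs ≠ []) :
    ((pvChunks k xs).getLastD []).length = (xs.length - 1) % k + 1 := by
  induction xs using pvChunks.induct k with
  | case1 => exact absurd rfl h
  | case2 x rest ih =>
    by_cases hd : rest.drop (k-1) = []
    · have hlen : rest.length ≤ k - 1 := by
        have := congrArg List.length hd
        simp at this
        omega
      have ht : rest.take (k-1) = rest := List.take_of_length_le hlen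
      simp only [pvChunks, hd, ht]
      simp [Nat.mod_eq_of_lt (show rest.length < k by omega)]
    · have hlen : k - 1 < rest.length := by
        by_contra hcon
        exact hd (List.drop_eq_nil_of_le (by omega))
      have hne := pvChunks_ne_nil k _ hd
      simp only [pvChunks]
      rw [List.getLastD_cons]
      obtain ⟨rs, r, hrr⟩ := (List.eq_nil_or_concat _).resolve_left hne
      rw [List.concat_eq_append] at hrr
      rw [hrr, List.getLastD_concat]
      have hIH := ih hd
      rw [hrr, List.getLastD_concat] at hIH
      rw [hIH]
      have e1 : rest.length - (k-1) - 1 = rest.length - k := by omega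
      have e2 : rest.length = (rest.length - k) + k := by omega
      simp only [List.length_drop, List.length_cons, e1, Nat.add_sub_cancel]
      conv_rhs => rw [e2, Nat.add_mod_right]

theorem pvUpdLast_ne_nil {α : Type} (f : α → α) (l : List α) (h : l ≠ []) :
    pvUpdLast f l ≠ [] := by
  intro he
  have := pvUpdLast_length f l
  rw [he] at this
  simp at this
  exact h (List.eq_nil_of_length_eq_zero this.symm)

theorem pvUpdLast_updLast {α : Type} (f g : α → α) (l : List α) :
    pvUpdLast f (pvUpdLast g l) = pvUpdLast (fun x => f (g x)) l := by
  induction l with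
  | nil => rfl
  | cons a t ih =>
    cases t with
    | nil => rfl
    | cons b u =>
      simp only [pvUpdLast]
      rw [pvUpdLast_cons f a _ (pvUpdLast_ne_nil g _ (by simp)), ih]

theorem pvUpdLast_congr {α : Type} (f g : α → α) (l : List α) (h : ∀ x, f x = g x) :
    pvUpdLast f l = pvUpdLast g l := by
  induction l with
  | nil => rfl
  | cons a t ih => cases t <;> simp_all [pvUpdLast]

theorem pvChunks_updLast {α : Type} (k : Nat) (hk : 1 ≤ k) (f : α → α) (xs : List α)
    (h : xs ≠ []) :
    pvChunks k (pvUpdLast f xs) = pvUpdLast (pvUpdLast f) (pvChunks k xs) := by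
  obtain ⟨ys, b, hys⟩ := (List.eq_nil_or_concat xs).resolve_left h
  rw [List.concat_eq_append] at hys
  subst hys
  rw [pvUpdLast_concat, pvChunks_snoc k hk ys (f b), pvChunks_snoc k hk ys b]
  by_cases hc : ys.length % k = 0
  · rw [if_pos hc, if_pos hc, pvUpdLast_concat]
    rfl
  · rw [if_neg hc, if_neg hc, pvUpdLast_updLast]
    exact pvUpdLast_congr _ _ _ (fun r => (pvUpdLast_concat f r b).symm)

theorem pvFlat_concat (r : List (Option String × List String)) (b : Option String × List String) :
    pvFlat (r ++ [b]) = pvFlat r ++ b.2 := by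
  simp [pvFlat]

theorem pvFlat_ne_nil (r : List (Option String × List String)) (hr : r ≠ [])
    (hv : ∀ b ∈ r, b.2 ≠ ([] : List String)) : pvFlat r ≠ [] := by
  obtain ⟨ys, b, hys⟩ := (List.eq_nil_or_concat r).resolve_left hr
  rw [List.concat_eq_append] at hys
  subst hys
  rw [pvFlat_concat]
  intro he
  rcases List.append_eq_nil_iff.mp he with ⟨-, h2⟩
  exact hv b (by simp) h2

theorem pvHdr_concat (r : List (Option String × List String)) (hr : r ≠ [])
    (x : Option String × List String) : pvHdr (r ++ [x]) = pvHdr r := by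
  cases r with
  | nil => exact absurd rfl hr
  | cons a t =>
    rcases a with ⟨oc, ls⟩
    cases oc <;> rfl

theorem pvHdr_updLast (g : Option String × List String → Option String × List String)
    (hg : ∀ b, (g b).1 = b.1) (r : List (Option String × List String)) :
    pvHdr (pvUpdLast g r) = pvHdr r := by
  cases r with
  | nil => rfl
  | cons a t =>
    cases t with
    | nil =>
      obtain ⟨oc, ls⟩ := a
      have h1 := hg (oc, ls)
      simp only [pvUpdLast]
      obtain ⟨go, gl, hgb⟩ : ∃ go gl, g (oc, ls) = (go, gl) :=
        ⟨(g (oc, ls)).1, (g (oc, ls)).2, rfl⟩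
      rw [hgb] at h1 ⊢
      simp at h1
      subst h1
      cases go <;> rfl
    | cons b u =>
      rcases a with ⟨oc, ls⟩
      cases oc <;> rfl

theorem pvFlat_updLast (line : String) (r : List (Option String × List String)) (hr : r ≠ []) :
    pvFlat (pvUpdLast (fun b => (b.1, b.2 ++ [line])) r) = pvFlat r ++ [line] := by
  obtain ⟨ys, b, hys⟩ := (List.eq_nil_or_concat r).resolve_left hr
  rw [List.concat_eq_append] at hys
  subst hys
  rw [pvUpdLast_concat, pvFlat_concat, pvFlat_concat]
  simp

theorem pvBatches_snoc (pre : List String) (rs : List (List (Option String × List String)))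
    (r : List (Option String × List String)) :
    pvBatches pre (rs ++ [r]) =
      pvBatches pre rs ++
        [PySem.Str.join "\n" ((if rs = [] then pre else pvHdr r) ++ pvFlat r)] := by
  cases rs with
  | nil => rfl
  | cons r0 rest => simp [pvBatches]

theorem pvF_eq (bs : Int) (pre : List String) (blocks : List (Option String × List String))
    (cat : Option String) (rs : List (List (Option String × List String)))
    (r : List (Option String × List String)) (hb : blocks ≠ [])
    (hr : pvChunks bs.toNat blocks = rs ++ [r]) :
    pvF bs (pre, blocks, cat) =
      (pvBatches pre rs, (if rs = [] then pre else pvHdr r) ++ pvFlat r, cat,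
        (r.length : Int)) := by
  cases blocks with
  | nil => exact absurd rfl hb
  | cons b0 bt => simp [pvF, hr]

theorem pvChunks_decomp (k : Nat) (blocks : List (Option String × List String))
    (hb : blocks ≠ []) (hv : ∀ b ∈ blocks, b.2 ≠ ([] : List String)) :
    ∃ rs r, pvChunks k blocks = rs ++ [r] ∧ r ≠ [] ∧ pvFlat r ≠ [] := by
  obtain ⟨rs, r, hrr⟩ := (List.eq_nil_or_concat _).resolve_left (pvChunks_ne_nil k blocks hb)
  rw [List.concat_eq_append] at hrr
  refine ⟨rs, r, hrr, ?_⟩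
  have hmem : r ∈ pvChunks k blocks := by rw [hrr]; simp
  have hrne := pvChunks_run_ne_nil k blocks r hmem
  exact ⟨hrne, pvFlat_ne_nil r hrne (fun b hbm => hv b (pvChunks_mem _ _ r hmem b hbm))⟩

theorem pv_mod_bridge (k n : Nat) (hk : 1 ≤ k) (hn : 1 ≤ n) :
    (k ≤ (n-1) % k + 1) ↔ n % k = 0 := by
  rcases Nat.eq_or_lt_of_le hk with hk1 | hk2
  · cases hk1
    simp [Nat.mod_one]
  · have hm : (n-1) % k < k := Nat.mod_lt _ (by omega)
    have key : n % k = ((n-1) % k + 1) % k := by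
      conv_lhs => rw [show n = (n-1) + 1 from by omega]
      rw [Nat.add_mod, Nat.one_mod_eq_one.mpr (by omega)]
    constructor
    · intro h
      have he : (n-1) % k + 1 = k := by omega
      rw [key, he, Nat.mod_self]
    · intro h
      by_contra hlt
      have h2 : (n-1) % k + 1 < k := by omega
      rw [key, Nat.mod_eq_of_lt h2] at h
      omega

theorem stepA_eval_sharp (bs : Int) (batches current : List String) (cat : Option String)
    (count : Int) (line : String) (h3 : PySem.Str.startswith line "### " = true) :
    stepA bs (batches, current, cat, count) line =
      if count ≥ bs ∧ current ≠ [] then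
        (batches ++ [PySem.Str.join "\n" current],
          (match cat with | some c => [c] | none => []) ++ [line], cat, 1)
      else (batches, current ++ [line], cat, count + 1) := by
  have h2 := pv_sw3_not2 line h3
  simp only [stepA]
  split_ifs with c1 c2 c3 <;> simp_all

theorem stepA_eval_other (bs : Int) (batches current : List String) (cat : Option String)
    (count : Int) (line : String) (h3 : PySem.Str.startswith line "### " = false) :
    stepA bs (batches, current, cat, count) line =
      (batches, current ++ [line],
        (if PySem.Str.startswith line "## " then some line else cat), count) := by
  simp only [stepA]
  split_ifs <;> simp_all

theorem stepB_eval_sharp (pre : List String) (blocks : List (Option String × List String))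
    (cat : Option String) (line : String) (h3 : PySem.Str.startswith line "### " = true) :
    stepB (pre, blocks, cat) line = (pre, blocks ++ [(cat, [line])], cat) := by
  cases blocks <;> simp_all [stepB]

theorem stepB_eval_other_nil (pre : List String) (cat : Option String) (line : String)
    (h3 : PySem.Str.startswith line "### " = false) :
    stepB (pre, [], cat) line =
      (pre ++ [line], [], (if PySem.Str.startswith line "## " then some line else cat)) := by
  by_cases h2 : PySem.Str.startswith line "## " <;> simp_all [stepB]

theorem stepB_eval_other_cons (pre : List String) (c : Option String × List String)
    (t : List (Option String × List String)) (cat : Option String) (line : String)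
    (h3 : PySem.Str.startswith line "### " = false) :
    stepB (pre, c :: t, cat) line =
      (pre, pvUpdLast (fun b => (b.1, b.2 ++ [line])) (c :: t),
        (if PySem.Str.startswith line "## " then some line else cat)) := by
  by_cases h2 : PySem.Str.startswith line "## " <;> simp_all [stepB]

theorem pv_step_comm (bs : Int) (hbs : bs ≥ 1) (line : String)
    (st : List String × List (Option String × List String) × Option String)
    (hv : pvValid st) :
    stepA bs (pvF bs st) line = pvF bs (stepB st line) := by
  obtain ⟨pre, blocks, cat⟩ := st
  have hvb : ∀ b ∈ blocks, b.2 ≠ ([] : List String) := hv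
  by_cases h3 : PySem.Str.startswith line "### "
  · -- a '### ' passport line
    rw [stepB_eval_sharp pre blocks cat line h3]
    rcases List.eq_nil_or_concat blocks with hnil | ⟨ys, c, hys⟩
    · subst hnil
      have hF : pvF bs (pre, ([] : List (Option String × List String)), cat) =
          ([], pre, cat, 0) := rfl
      rw [hF, stepA_eval_sharp bs [] pre cat 0 line h3]
      simp only [List.nil_append]
      have hruns : pvChunks bs.toNat [(cat, [line])] = [] ++ [[(cat, [line])]] := by
        simp [pvChunks]
      rw [pvF_eq bs pre _ cat [] [(cat, [line])] (by simp) hruns]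
      rw [if_neg (by rintro ⟨hc, -⟩; omega)]
      simp [pvBatches, pvFlat]
    · -- blocks ≠ []
      have hb : blocks ≠ [] := by rw [List.concat_eq_append] at hys; simp [hys]
      obtain ⟨rs, r, hrr, hrne, hfne⟩ := pvChunks_decomp bs.toNat blocks hb hvb
      rw [pvF_eq bs pre blocks cat rs r hb hrr]
      rw [stepA_eval_sharp bs _ _ cat _ line h3]
      have hcur : (if rs = [] then pre else pvHdr r) ++ pvFlat r ≠ [] := by
        intro he
        exact hfne (List.append_eq_nil_iff.mp he).2
      have hk : 1 ≤ bs.toNat := by omega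
      have hlen : r.length = (blocks.length - 1) % bs.toNat + 1 := by
        have h2 := pvChunks_getLastD_length bs.toNat hk blocks hb
        rw [hrr, List.getLastD_concat] at h2
        exact h2
      have hbn : 1 ≤ blocks.length := by
        cases blocks
        · exact absurd rfl hb
        · simp
      have hbridge : ((r.length : Int) ≥ bs) ↔ blocks.length % bs.toNat = 0 := by
        have h1 : ((r.length : Int) ≥ bs) ↔ bs.toNat ≤ r.length := by omega
        rw [h1, hlen]
        exact pv_mod_bridge bs.toNat blocks.length hk hbn
      by_cases hmod : blocks.length % bs.toNat = 0
      · -- flush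
        rw [if_pos ⟨hbridge.mpr hmod, hcur⟩]
        have hruns' : pvChunks bs.toNat (blocks ++ [(cat, [line])]) =
            (rs ++ [r]) ++ [[(cat, [line])]] := by
          rw [pvChunks_snoc bs.toNat hk blocks, if_pos hmod, hrr]
        rw [pvF_eq bs pre _ cat (rs ++ [r]) [(cat, [line])] (by simp) hruns']
        rw [pvBatches_snoc]
        cases cat <;> simp [pvHdr, pvFlat]
      · -- no flush
        rw [if_neg (by rintro ⟨hge, -⟩; exact hmod (hbridge.mp hge))]
        have hruns' : pvChunks bs.toNat (blocks ++ [(cat, [line])]) =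
            rs ++ [r ++ [(cat, [line])]] := by
          rw [pvChunks_snoc bs.toNat hk blocks, if_neg hmod, hrr, pvUpdLast_concat]
        rw [pvF_eq bs pre _ cat rs (r ++ [(cat, [line])]) (by simp) hruns']
        rw [pvHdr_concat r hrne, pvFlat_concat]
        simp [List.append_assoc]
  · -- not a passport line
    have h3' : PySem.Str.startswith line "### " = false := by simpa using h3
    cases blocks with
    | nil =>
      rw [stepB_eval_other_nil pre cat line h3']
      have hF : pvF bs (pre, ([] : List (Option String × List String)), cat) =
          ([], pre, cat, 0) := rfl
      rw [hF, stepA_eval_other bs [] pre cat 0 line h3']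
      rfl
    | cons c t =>
      rw [stepB_eval_other_cons pre c t cat line h3']
      have hb : c :: t ≠ ([] : List (Option String × List String)) := by simp
      obtain ⟨rs, r, hrr, hrne, hfne⟩ := pvChunks_decomp bs.toNat (c :: t) hb hvb
      rw [pvF_eq bs pre (c :: t) cat rs r hb hrr]
      rw [stepA_eval_other bs _ _ cat _ line h3']
      have hruns' : pvChunks bs.toNat
          (pvUpdLast (fun b => (b.1, b.2 ++ [line])) (c :: t)) =
          rs ++ [pvUpdLast (fun b => (b.1, b.2 ++ [line])) r] := by
        rw [pvChunks_updLast bs.toNat (by omega) _ (c :: t) hb, hrr, pvUpdLast_concat]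
      rw [pvF_eq bs pre _ _ rs (pvUpdLast (fun b => (b.1, b.2 ++ [line])) r)
        (pvUpdLast_ne_nil _ _ hb) hruns']
      rw [pvHdr_updLast (fun b => (b.1, b.2 ++ [line])) (fun b => rfl) r,
        pvFlat_updLast line r hrne, pvUpdLast_length]
      simp [List.append_assoc]

theorem pv_valid_step (st : List String × List (Option String × List String) × Option String)
    (line : String) (hv : pvValid st) : pvValid (stepB st line) := by
  obtain ⟨pre, blocks, cat⟩ := st
  have hvb : ∀ b ∈ blocks, b.2 ≠ ([] : List String) := hv
  by_cases h3 : PySem.Str.startswith line "### "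
  · rw [stepB_eval_sharp pre blocks cat line h3]
    intro b hbm
    simp only at hbm
    rcases List.mem_append.mp hbm with h | h
    · exact hvb b h
    · simp at h
      subst h
      simp
  · have h3' : PySem.Str.startswith line "### " = false := by simpa using h3
    cases blocks with
    | nil =>
      rw [stepB_eval_other_nil pre cat line h3']
      intro b hbm
      simp at hbm
    | cons c t =>
      rw [stepB_eval_other_cons pre c t cat line h3']
      intro b hbm
      simp only at hbm
      obtain ⟨ys, d, hys⟩ := (List.eq_nil_or_concat (c :: t)).resolve_left (by simp)
      rw [List.concat_eq_append] at hys
      rw [hys, pvUpdLast_concat] at hbm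
      rcases List.mem_append.mp hbm with h | h
      · exact hvb b (by rw [hys]; exact List.mem_append_left _ h)
      · simp at h
        subst h
        simp

theorem pv_sim (bs : Int) (hbs : bs ≥ 1) (lines : List String) :
    ∀ st, pvValid st →
      lines.foldl (stepA bs) (pvF bs st) = pvF bs (lines.foldl stepB st) := by
  induction lines with
  | nil => intro st hv; rfl
  | cons line rest ih =>
    intro st hv
    simp only [List.foldl_cons]
    rw [pv_step_comm bs hbs line st hv]
    exact ih (stepB st line) (pv_valid_step st line hv)

theorem pv_valid_fold (lines : List String) :
    ∀ st, pvValid st → pvValid (lines.foldl stepB st) := by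
  induction lines with
  | nil => exact fun st hv => hv
  | cons l rest ih => exact fun st hv => ih _ (pv_valid_step st l hv)

-- A's final value, for a nonempty block list: the chunked batches
theorem pv_finish_A (bs : Int) (hbs : bs ≥ 1) (pre : List String)
    (blocks : List (Option String × List String)) (cat : Option String)
    (hb : blocks ≠ []) (hv : ∀ b ∈ blocks, b.2 ≠ ([] : List String)) :
    (pvF bs (pre, blocks, cat)).1 ++
      (if (pvF bs (pre, blocks, cat)).2.1 ≠ []
        then [PySem.Str.join "\n" (pvF bs (pre, blocks, cat)).2.1] else []) =
      pvBatches pre (pvChunks bs.toNat blocks) := by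
  obtain ⟨rs, r, hrr, hrne, hfne⟩ := pvChunks_decomp bs.toNat blocks hb hv
  rw [pvF_eq bs pre blocks cat rs r hb hrr, hrr]
  have hcur : (if rs = [] then pre else pvHdr r) ++ pvFlat r ≠ [] := by
    intro he
    exact hfne (List.append_eq_nil_iff.mp he).2
  rw [if_pos hcur, ← pvBatches_snoc]

-- ===== B-side lemmas =====

theorem pv_foldl_snoc_map {α β : Type} (h : α → β) :
    ∀ (r : List α) (acc : List β),
      r.foldl (fun a x => a ++ [h x]) acc = acc ++ r.map h := by
  intro r
  induction r with
  | nil => simp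
  | cons x t ih => intro acc; simp [ih]

theorem pvRange_pos_cons (a b s : Int) (hs : 0 < s) (hab : a < b) :
    PySem.List.pyRange a b s = a :: PySem.List.pyRange (a + s) b s := by
  rw [PySem.List.pyRange_of_pos a b hs, PySem.List.pyRange_of_pos (a+s) b hs]
  rw [if_pos hab]
  have hdiv : (b - a + s - 1) / s = (b - a - 1) / s + 1 := by
    have : b - a + s - 1 = (b - a - 1) + 1 * s := by ring
    rw [this, Int.add_mul_ediv_right _ _ (by omega)]
  by_cases hab2 : a + s < b
  · rw [if_pos hab2]
    have hpos : 0 ≤ (b - a - 1) / s := Int.ediv_nonneg (by omega) (by omega)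
    have e2 : ((b - a + s - 1) / s).toNat = ((b - (a+s) + s - 1) / s).toNat + 1 := by
      rw [hdiv]
      have : b - (a+s) + s - 1 = b - a - 1 := by ring
      rw [this]
      omega
    rw [e2, List.range_succ_eq_map]
    simp only [List.map_cons, List.map_map]
    congr 1
    · simp
    · apply List.map_congr_left
      intro k _
      simp only [Function.comp_apply]
      push_cast
      ring
  · rw [if_neg hab2]
    have hz : (b - a - 1) / s = 0 :=
      Int.ediv_eq_zero_of_lt (by omega) (by omega)
    have e2 : ((b - a + s - 1) / s).toNat = 1 := by rw [hdiv, hz]; rfl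
    rw [e2]
    simp

theorem pv_sliceChunks (bs : Int) (hbs : 1 ≤ bs)
    (full : List (Option String × List String)) :
    ∀ (fuel j : Nat), full.length - j ≤ fuel →
      (PySem.List.pyRange (j : Int) (full.length : Int) bs).map
          (fun i => PySem.List.slice full (some i) (some (i + bs))) =
        pvChunks bs.toNat (full.drop j) := by
  intro fuel
  induction fuel with
  | zero =>
    intro j hj
    have hle : full.length ≤ j := by omega
    rw [PySem.List.pyRange_of_pos _ _ (by omega), if_neg (by exact_mod_cast not_lt.mpr hle)]
    rw [List.drop_eq_nil_of_le hle]
    simp [pvChunks]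
  | succ fuel ih =>
    intro j hj
    by_cases hlt : j < full.length
    · rw [pvRange_pos_cons _ _ _ (by omega) (by exact_mod_cast hlt)]
      rw [List.map_cons]
      have hcast : (j : Int) + bs = ((j + bs.toNat : Nat) : Int) := by
        push_cast
        omega
      have hhead : PySem.List.slice full (some (j : Int)) (some ((j : Int) + bs)) =
          (full.drop j).take bs.toNat := by
        rw [show ((j : Int) + bs) = ((j : Int) + ((bs.toNat : Nat) : Int)) by omega]
        exact PySem.List.slice_natCast_add full j bs.toNat
      obtain ⟨x, xs, hxxs⟩ := List.exists_cons_of_ne_nil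
        (show full.drop j ≠ [] by
          intro he
          have := congrArg List.length he
          simp at this
          omega)
      have hxs : xs = full.drop (j + 1) := by
        have := congrArg List.tail hxxs
        simpa [List.tail_drop] using this.symm
      have hdd : xs.drop (bs.toNat - 1) = full.drop (j + bs.toNat) := by
        rw [hxs, List.drop_drop]
        congr 1
        omega
      rw [hhead, hxxs]
      have htake : (x :: xs).take bs.toNat = x :: xs.take (bs.toNat - 1) := by
        rw [show bs.toNat = (bs.toNat - 1) + 1 by omega]
        simp
      rw [htake]
      have hchunk : pvChunks bs.toNat (x :: xs) =
          (x :: xs.take (bs.toNat - 1)) :: pvChunks bs.toNat (xs.drop (bs.toNat - 1)) := by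
        rw [pvChunks]
      rw [hchunk]
      congr 1
      rw [hcast, hdd]
      exact ih (j + bs.toNat) (by omega)
    · have hle : full.length ≤ j := by omega
      rw [PySem.List.pyRange_of_pos _ _ (by omega), if_neg (by exact_mod_cast not_lt.mpr hle)]
      rw [List.drop_eq_nil_of_le hle]
      simp [pvChunks]

theorem pv_alt_body_eq (bs : Int) (hbs : 1 ≤ bs) (pre : List String)
    (blocks : List (Option String × List String)) (hb : blocks ≠ []) :
    (PySem.List.pyRange 0 blocks.length bs).foldl
      (fun acc i =>
        acc ++ [PySem.Str.join "\n"
          (if i = 0 then pre ++ pvFlat (PySem.List.slice blocks (some i) (some (i + bs)))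
           else pvHdr (PySem.List.slice blocks (some i) (some (i + bs))) ++
                pvFlat (PySem.List.slice blocks (some i) (some (i + bs))))]) [] =
      pvBatches pre (pvChunks bs.toNat blocks) := by
  rw [pv_foldl_snoc_map _ (PySem.List.pyRange 0 blocks.length bs) []]
  have hn : (0 : Int) < blocks.length := by
    cases blocks
    · exact absurd rfl hb
    · simp
  rw [pvRange_pos_cons 0 _ bs (by omega) hn, List.map_cons]
  have hhead : PySem.List.slice blocks (some (0 : Int)) (some ((0 : Int) + bs)) =
      blocks.take bs.toNat := by
    have := PySem.List.slice_natCast_add blocks 0 bs.toNat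
    rw [show ((0 : Int) + bs) = (((0 : Nat) : Int) + ((bs.toNat : Nat) : Int)) by omega]
    simpa using this
  have htail : (PySem.List.pyRange (0 + bs) (blocks.length : Int) bs).map
      (fun i => PySem.List.slice blocks (some i) (some (i + bs))) =
      pvChunks bs.toNat (blocks.drop bs.toNat) := by
    rw [show ((0 : Int) + bs) = ((bs.toNat : Nat) : Int) by omega]
    exact pv_sliceChunks bs hbs blocks blocks.length bs.toNat (by omega)
  obtain ⟨x, xs, hxxs⟩ := List.exists_cons_of_ne_nil hb
  have hchunk : pvChunks bs.toNat blocks =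
      (x :: xs.take (bs.toNat - 1)) :: pvChunks bs.toNat (xs.drop (bs.toNat - 1)) := by
    rw [hxxs, pvChunks]
  have htake : blocks.take bs.toNat = x :: xs.take (bs.toNat - 1) := by
    rw [hxxs, show bs.toNat = (bs.toNat - 1) + 1 by omega]
    simp
  have hdrop : blocks.drop bs.toNat = xs.drop (bs.toNat - 1) := by
    rw [hxxs, show bs.toNat = (bs.toNat - 1) + 1 by omega]
    simp
  rw [hchunk]
  simp only [pvBatches, List.nil_append]
  congr 1
  · simp only [zero_add, PySem.List.slice_zero_start]
    rw [PySem.List.slice_to blocks (by omega : (0:Int) ≤ bs), htake, if_pos trivial]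
  · have hmap : ∀ i ∈ PySem.List.pyRange (0 + bs) (blocks.length : Int) bs,
        PySem.Str.join "\n"
          (if i = 0 then pre ++ pvFlat (PySem.List.slice blocks (some i) (some (i + bs)))
           else pvHdr (PySem.List.slice blocks (some i) (some (i + bs))) ++
                pvFlat (PySem.List.slice blocks (some i) (some (i + bs)))) =
          (fun r => PySem.Str.join "\n" (pvHdr r ++ pvFlat r))
            (PySem.List.slice blocks (some i) (some (i + bs))) := by
      intro i hi
      have hge : 0 + bs ≤ i := ((PySem.List.mem_pyRange_iff_of_pos (by omega) i).mp hi).1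
      rw [if_neg (by omega)]
    rw [List.map_congr_left hmap]
    rw [show (fun a => (fun r => PySem.Str.join "\n" (pvHdr r ++ pvFlat r))
          (PySem.List.slice blocks (some a) (some (a + bs)))) =
        ((fun r => PySem.Str.join "\n" (pvHdr r ++ pvFlat r)) ∘
          (fun i => PySem.List.slice blocks (some i) (some (i + bs)))) from rfl]
    rw [← List.map_map, htail, hdrop]

-- ===== VERDICT (by name: the statement is the Claim_ definition above) =====
theorem split_passports_into_batches_spec : Claim_equal_split_passports_into_batches := by
  intro passports_md batch_size _hdom hpre
  have hbs : batch_size ≥ 1 := hpre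
  unfold Spec_split_passports_into_batches split_passports_into_batches
    split_passports_into_batches_alt
  have hv0 : pvValid ([], [], none) := by intro b hb; simp at hb
  have hsim := pv_sim batch_size hbs
    (List.map String.ofList (PySem.Chars.splitOn passports_md.toList ['\n'])) ([], [], none) hv0
  have h0 : pvF batch_size ([], ([] : List (Option String × List String)), none) =
      ([], [], none, 0) := rfl
  rw [h0] at hsim
  simp only []
  rw [hsim]
  have hv := pv_valid_fold
    (List.map String.ofList (PySem.Chars.splitOn passports_md.toList ['\n'])) ([], [], none) hv0
  rcases hfe : (List.map String.ofList (PySem.Chars.splitOn passports_md.toList ['\n'])).foldl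
      stepB ([], [], none) with ⟨pre, blocks, cat⟩
  rw [hfe] at hv
  by_cases hb : blocks = []
  · subst hb
    simp [pvF]
  · rw [show (pre, blocks, cat).2.1 = blocks from rfl, show (pre, blocks, cat).1 = pre from rfl]
    rw [if_neg hb]
    have hfin := pv_finish_A batch_size hbs pre blocks cat hb hv
    rw [hfin]
    exact (pv_alt_body_eq batch_size hbs pre blocks hb).symm
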